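-- pv_equiv track=rewrite | github.com/AS2/habrolink | tools/UserParser/user-parser.py | build_prefixes
-- ===== SOURCE A (Python) =====
-- import string
-- import itertools
--
-- def build_prefixes(prefixLength : int, skipUntill = ""):
-- 	prefixes = [] # list of all prefixes
-- 	chars = string.ascii_lowercase + string.digits
-- 	skip = (skipUntill != "")
-- 	for item in itertools.product(chars, repeat=prefixLength):
-- 		if "".join(item) == skipUntill:
-- 			skip = False
-- 		if skip:
-- 			continue
-- 		prefixes.append("".join(item))
-- 	return prefixes
-- ===== SOURCE B (Python) =====
-- import string
--
-- def build_prefixes(prefixLength: int, skipUntill=""):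
--     chars = string.ascii_lowercase + string.digits
--
--     def gen(n):
--         if n == 0:
--             return [""]
--         rests = gen(n - 1)
--         return [c + rest for c in chars for rest in rests]
--
--     prefixes = gen(prefixLength)
--     if skipUntill == "":
--         return prefixes
--     if skipUntill in prefixes:
--         return prefixes[prefixes.index(skipUntill):]
--     return []
-- ===== Notes on version B (the rewrite author's own statement) =====
-- stated objective: alternative
-- what changed: Replaces the itertools.product enumeration with an explicit recursive cartesian product (prepending characters) and replaces the per-item skip flag by generate-then-locate-and-slice via index().
import Mathlib
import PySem

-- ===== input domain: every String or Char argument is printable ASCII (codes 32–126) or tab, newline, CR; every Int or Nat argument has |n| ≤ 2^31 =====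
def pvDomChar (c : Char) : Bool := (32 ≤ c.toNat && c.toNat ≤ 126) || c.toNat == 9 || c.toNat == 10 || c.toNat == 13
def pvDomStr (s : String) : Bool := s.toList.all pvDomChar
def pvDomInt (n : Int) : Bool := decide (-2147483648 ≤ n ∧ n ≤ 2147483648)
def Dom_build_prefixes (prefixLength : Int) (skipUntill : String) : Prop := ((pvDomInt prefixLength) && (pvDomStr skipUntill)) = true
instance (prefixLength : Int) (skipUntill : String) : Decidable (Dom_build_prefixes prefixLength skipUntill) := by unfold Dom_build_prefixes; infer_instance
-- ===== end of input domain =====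

-- B replaces itertools.product + a per-item skip flag by a recursive cartesian product and
-- locate-and-slice; a genuinely different decomposition of the same task (no speed claim).

-- chars = string.ascii_lowercase + string.digits (shared constant of both Pythons)
def pvChars : List Char := "abcdefghijklmnopqrstuvwxyz0123456789".toList

-- ===== PORT A =====
-- itertools.product(chars, repeat=n) in its documented order:
-- result = [[]]; for each pool: result = [x+[y] for x in result for y in pool]
def pvProdA : Nat → List (List Char)
  | 0 => [[]]
  | n + 1 => (pvProdA n).flatMap (fun t => pvChars.map (fun c => t ++ [c]))

-- one iteration of A's for-body (strings handled as their char lists;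
-- "".join(item) == skipUntill is list equality, append joins the item)
def pvStep (s : List Char) (acc : List String × Bool) (item : List Char) : List String × Bool :=
  let skip := if item == s then false else acc.2
  if skip then (acc.1, skip) else (acc.1 ++ [String.ofList item], skip)

def build_prefixes (prefixLength : Int) (skipUntill : String) : List String :=
  let s := skipUntill.toList
  ((pvProdA prefixLength.toNat).foldl (pvStep s) ([], s != [])).1

-- ===== PORT B =====
-- gen(n): [''] for n == 0, else [c + rest for c in chars for rest in gen(n-1)]
def pvGen : Nat → List (List Char)
  | 0 => [[]]
  | n + 1 => pvChars.flatMap (fun c => (pvGen n).map (fun rest => c :: rest))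

def build_prefixes_alt (prefixLength : Int) (skipUntill : String) : List String :=
  let prefixes := (pvGen prefixLength.toNat).map String.ofList
  if skipUntill == "" then prefixes
  else if prefixes.contains skipUntill then
    match PySem.List.index? prefixes skipUntill with
    | some i => PySem.List.slice prefixes (some (i : Int)) none
    | none => []
  else []

-- ===== PRECONDITION & SPEC =====
-- Pre_ excludes only negative lengths, where A raises ValueError (itertools.product rejects a negative repeat).
def Pre_build_prefixes (prefixLength : Int) (skipUntill : String) : Prop := 0 ≤ prefixLength
instance (prefixLength : Int) (skipUntill : String) : Decidable (Pre_build_prefixes prefixLength skipUntill) := by unfold Pre_build_prefixes; infer_instance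
def pvWitness_build_prefixes : Int × String := (1, "c")

def Spec_build_prefixes (prefixLength : Int) (skipUntill : String) (out : List String) : Prop := out = build_prefixes_alt prefixLength skipUntill
instance (prefixLength : Int) (skipUntill : String) (out : List String) : Decidable (Spec_build_prefixes prefixLength skipUntill out) := by unfold Spec_build_prefixes; infer_instance

-- ===== CLAIM (what is proved, stated in full; the proofs are below) =====
def Claim_equal_build_prefixes : Prop := ∀ (prefixLength : Int) (skipUntill : String), Dom_build_prefixes prefixLength skipUntill → Pre_build_prefixes prefixLength skipUntill → Spec_build_prefixes prefixLength skipUntill (build_prefixes prefixLength skipUntill)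

-- ===== LEMMAS AND PROOFS =====

-- pvGen also satisfies the "append on the right" recursion of itertools.product
theorem pvGen_succ_snoc (n : Nat) :
    pvGen (n + 1) = (pvGen n).flatMap (fun t => pvChars.map (fun c => t ++ [c])) := by
  induction n with
  | zero => simp [pvGen, ← List.map_eq_flatMap]
  | succ n ih =>
      show pvChars.flatMap (fun c => (pvGen (n + 1)).map (fun rest => c :: rest)) = _
      conv_lhs => rw [ih]
      conv_rhs => rw [show pvGen (n + 1) = pvChars.flatMap (fun c => (pvGen n).map (fun rest => c :: rest)) from rfl]
      simp [List.map_flatMap, List.flatMap_map, List.flatMap_assoc, List.map_map, Function.comp_def, List.cons_append]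

theorem pvProdA_eq_pvGen (n : Nat) : pvProdA n = pvGen n := by
  induction n with
  | zero => rfl
  | succ n ih => rw [pvProdA, ih, pvGen_succ_snoc]

-- A's loop with skip already False appends everything
theorem loop_false (s : List Char) (xs : List (List Char)) (acc : List String) :
    xs.foldl (pvStep s) (acc, false) = (acc ++ xs.map String.ofList, false) := by
  induction xs generalizing acc with
  | nil => simp
  | cons x xs ih =>
      rw [List.foldl_cons]
      by_cases hx : x = s <;> simp [pvStep, hx, ih]

-- A's loop with skip True drops items until the marker
theorem loop_true (s : List Char) (xs : List (List Char)) (acc : List String) :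
    (xs.foldl (pvStep s) (acc, true)).1
      = acc ++ (xs.dropWhile (fun t => t != s)).map String.ofList := by
  induction xs generalizing acc with
  | nil => simp
  | cons x xs ih =>
      rw [List.foldl_cons]
      by_cases hx : x = s
      · simp [pvStep, hx, loop_false]
      · simp [pvStep, hx, ih]

-- B's locate-and-slice equals dropWhile of the marker, through the String.ofList map
theorem bside (s : List Char) (xs : List (List Char)) :
    (if (xs.map String.ofList).contains (String.ofList s) then
       match PySem.List.index? (xs.map String.ofList) (String.ofList s) with
       | some i => PySem.List.slice (xs.map String.ofList) (some (i : Int)) none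
       | none => ([] : List String)
     else [])
    = (xs.dropWhile (fun t => t != s)).map String.ofList := by
  induction xs with
  | nil => simp
  | cons x xs ih =>
      by_cases hx : x = s
      · subst hx
        rw [PySem.List.index?_eq_idxOf?]
        simp [List.idxOf?_cons]
      · have hmk : String.ofList x ≠ String.ofList s := fun h => hx (String.ofList_inj.mp h)
        rw [PySem.List.index?_eq_idxOf?] at ih ⊢
        rcases h : List.idxOf? (String.ofList s) (xs.map String.ofList) with _ | i
        · have hm : String.ofList s ∉ xs.map String.ofList := List.idxOf?_eq_none_iff.mp h
          rw [List.idxOf?_eq_none_iff.mpr hm] at ih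
          simp only [hm, List.contains_eq_mem, decide_eq_true_eq] at ih
          simp only [List.map_cons, List.contains_cons, List.idxOf?_cons,
            List.dropWhile_cons, bne_iff_ne, ne_eq, hx, not_false_eq_true, if_true]
          simpa [Ne.symm hmk, hm] using ih
        · have hm : String.ofList s ∈ xs.map String.ofList := by
            by_contra hm
            rw [List.idxOf?_eq_none_iff.mpr hm] at h
            cases h
          rw [h] at ih
          simp only [List.contains_eq_mem, hm, decide_true, if_true] at ih
          simp only [List.map_cons, List.idxOf?_cons, List.dropWhile_cons, bne_iff_ne,
            ne_eq, hx, not_false_eq_true, if_true, h, Option.map_some,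
            beq_iff_eq, hmk, if_false, List.contains_eq_mem, List.mem_cons, hm, or_true,
            decide_true]
          rw [PySem.List.slice_from_natCast, List.drop_succ_cons]
          rw [PySem.List.slice_from_natCast] at ih
          exact ih

-- ===== VERDICT (by name: the statement is the Claim_ definition above) =====
theorem build_prefixes_spec : Claim_equal_build_prefixes := by
  intro L s _ _
  unfold Spec_build_prefixes build_prefixes build_prefixes_alt
  simp only [pvProdA_eq_pvGen]
  by_cases hs : s = ""
  · subst hs
    simp [loop_false]
  · have hlist : s.toList ≠ [] := fun h => hs (String.toList_eq_nil_iff.mp h)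
    have hne : (s.toList != []) = true := by simpa using hlist
    simp only [hne, beq_iff_eq, hs, if_false]
    rw [loop_true]
    have hofl : String.ofList s.toList = s := String.ofList_toList
    rw [← hofl, bside]
    simp
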